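-- pv_equiv track=rewrite | github.com/arthurzengg/coding_q | epic_oa/q2.py | find_sum_seeds
-- ===== SOURCE A (Python) =====
-- def find_sum_seeds(number):
--     sum_seeds = []
--
--     # Function to calculate the sum of digits of a number
--     def digit_sum(n):
--         total = 0
--         # Loop through each digit of the number
--         while n > 0:
--             # Extract the last digit
--             digit = n % 10
--             # Add the digit to the total sum
--             total += digit
--             # Remove the last digit from the number
--             n //= 10
--         return total
--
--     # Check for sum seeds
--     for i in range(1, number):
--         # Calculate the sum of the current number and the sum of its digits
--         current_sum = i + digit_sum(i)
--         # If the sum matches the input number, add the current number to sum_seeds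
--         if current_sum == number:
--             sum_seeds.append(i)
--
--     return sum_seeds
-- ===== SOURCE B (Python) =====
-- def find_sum_seeds(number):
--     # digit sum of n (same helper as the task needs)
--     def digit_sum(n):
--         total = 0
--         while n > 0:
--             total += n % 10
--             n //= 10
--         return total
--
--     # count the digits of number
--     digits = 0
--     t = number
--     while t > 0:
--         digits += 1
--         t //= 10
--     # any seed i satisfies number - i = digit_sum(i) <= 9*digits, so only
--     # the window [number - 9*digits, number) can contain seeds
--     start = max(1, number - 9 * digits)
--     return [i for i in range(start, number) if i + digit_sum(i) == number]
-- ===== Notes on version B (the rewrite author's own statement) =====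
-- stated objective: faster
-- what changed: B checks only the window [number - 9*digits(number), number) instead of scanning all of [1, number), since digit_sum(i) <= 9*digits; it counts digits with a division loop and filters the tiny window.
import Mathlib
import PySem

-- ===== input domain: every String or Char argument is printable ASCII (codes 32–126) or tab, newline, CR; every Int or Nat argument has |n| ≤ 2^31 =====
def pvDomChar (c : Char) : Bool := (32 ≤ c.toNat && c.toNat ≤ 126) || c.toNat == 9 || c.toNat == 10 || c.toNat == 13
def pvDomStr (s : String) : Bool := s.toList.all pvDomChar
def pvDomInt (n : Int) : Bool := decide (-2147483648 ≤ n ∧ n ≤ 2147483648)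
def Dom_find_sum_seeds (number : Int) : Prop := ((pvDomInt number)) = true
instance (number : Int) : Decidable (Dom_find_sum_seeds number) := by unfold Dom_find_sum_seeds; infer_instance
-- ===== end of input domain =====

-- B replaces A's full scan of [1, number) by a scan of only the window
-- [max(1, number - 9*digits(number)), number), since digit_sum(i) ≤ 9*digits.

-- termination helper for the division loops (cited by decreasing_by)
theorem pv_fdiv10_lt (n : Int) (h : 0 < n) :
    (PySem.Int.floordiv n 10).toNat < n.toNat := by
  have h1 : PySem.Int.floordiv n 10 < n :=
    (PySem.Int.floordiv_lt_iff_lt_mul (by omega : (0:Int) < 10)).mpr (by omega)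
  have h2 : (0:Int) ≤ PySem.Int.floordiv n 10 :=
    (PySem.Int.le_floordiv_iff_mul_le (by omega : (0:Int) < 10)).mpr (by omega)
  omega

-- ===== PORT A =====
-- A's inner 'while n > 0' digit-sum loop, with accumulator 'total'
def pvA_digit_sum (n total : Int) : Int :=
  if h : 0 < n then pvA_digit_sum (PySem.Int.floordiv n 10) (total + PySem.Int.mod n 10)
  else total
termination_by n.toNat
decreasing_by exact pv_fdiv10_lt n h

def find_sum_seeds (number : Int) : List Int :=
  (PySem.List.pyRange 1 number 1).foldl
    (fun sum_seeds i =>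
      if i + pvA_digit_sum i 0 = number then sum_seeds ++ [i] else sum_seeds) []

-- ===== PORT B =====
-- B's digit_sum helper (same while loop as in Source B)
def pvB_digit_sum (n total : Int) : Int :=
  if h : 0 < n then pvB_digit_sum (PySem.Int.floordiv n 10) (total + PySem.Int.mod n 10)
  else total
termination_by n.toNat
decreasing_by exact pv_fdiv10_lt n h

-- B's digit-count loop: 'while t > 0: digits += 1; t //= 10'
def pvB_count_digits (t digits : Int) : Int :=
  if h : 0 < t then pvB_count_digits (PySem.Int.floordiv t 10) (digits + 1)
  else digits
termination_by t.toNat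
decreasing_by exact pv_fdiv10_lt t h

def find_sum_seeds_alt (number : Int) : List Int :=
  (PySem.List.pyRange (max 1 (number - 9 * pvB_count_digits number 0)) number 1).filter
    (fun i => decide (i + pvB_digit_sum i 0 = number))

-- ===== PRECONDITION & SPEC =====
def Spec_find_sum_seeds (number : Int) (out : List Int) : Prop := out = find_sum_seeds_alt number
instance (number : Int) (out : List Int) : Decidable (Spec_find_sum_seeds number out) := by unfold Spec_find_sum_seeds; infer_instance

-- ===== CLAIM (what is proved, stated in full; the proofs are below) =====
def Claim_equal_find_sum_seeds : Prop := ∀ (number : Int), Dom_find_sum_seeds number → Spec_find_sum_seeds number (find_sum_seeds number)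

-- ===== LEMMAS AND PROOFS =====

theorem dsB_pos (n t : Int) (h : 0 < n) :
    pvB_digit_sum n t = pvB_digit_sum (PySem.Int.floordiv n 10) (t + PySem.Int.mod n 10) := by
  rw [pvB_digit_sum.eq_def]; simp [h]

theorem dsB_nonpos (n t : Int) (h : ¬ 0 < n) : pvB_digit_sum n t = t := by
  rw [pvB_digit_sum.eq_def]; simp [h]

theorem cd_pos (t d : Int) (h : 0 < t) :
    pvB_count_digits t d = pvB_count_digits (PySem.Int.floordiv t 10) (d + 1) := by
  rw [pvB_count_digits.eq_def]; simp [h]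

theorem cd_nonpos (t d : Int) (h : ¬ 0 < t) : pvB_count_digits t d = d := by
  rw [pvB_count_digits.eq_def]; simp [h]

theorem ds_eq_fuel (k : Nat) : ∀ (n t : Int), n.toNat ≤ k → pvA_digit_sum n t = pvB_digit_sum n t := by
  induction k with
  | zero =>
    intro n t hk
    have h : ¬ 0 < n := by omega
    rw [pvA_digit_sum.eq_def, dsB_nonpos n t h]; simp [h]
  | succ k ih =>
    intro n t hk
    by_cases h : 0 < n
    · have hlt := pv_fdiv10_lt n h
      rw [pvA_digit_sum.eq_def, dsB_pos n t h]
      simp only [h, dif_pos]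
      exact ih _ _ (by omega)
    · rw [pvA_digit_sum.eq_def, dsB_nonpos n t h]; simp [h]

theorem ds_eq (n t : Int) : pvA_digit_sum n t = pvB_digit_sum n t :=
  ds_eq_fuel n.toNat n t le_rfl

theorem ds_acc_fuel (k : Nat) : ∀ (n t : Int), n.toNat ≤ k →
    pvB_digit_sum n t = t + pvB_digit_sum n 0 := by
  induction k with
  | zero =>
    intro n t hk
    have h : ¬ 0 < n := by omega
    rw [dsB_nonpos n t h, dsB_nonpos n 0 h]; ring
  | succ k ih =>
    intro n t hk
    by_cases h : 0 < n
    · have hlt := pv_fdiv10_lt n h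
      rw [dsB_pos n t h, dsB_pos n 0 h,
          ih _ (t + PySem.Int.mod n 10) (by omega),
          ih _ (0 + PySem.Int.mod n 10) (by omega)]
      ring
    · rw [dsB_nonpos n t h, dsB_nonpos n 0 h]; ring

theorem ds_acc (n t : Int) : pvB_digit_sum n t = t + pvB_digit_sum n 0 :=
  ds_acc_fuel n.toNat n t le_rfl

theorem cd_acc_fuel (k : Nat) : ∀ (t d : Int), t.toNat ≤ k →
    pvB_count_digits t d = d + pvB_count_digits t 0 := by
  induction k with
  | zero =>
    intro t d hk
    have h : ¬ 0 < t := by omega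
    rw [cd_nonpos t d h, cd_nonpos t 0 h]; ring
  | succ k ih =>
    intro t d hk
    by_cases h : 0 < t
    · have hlt := pv_fdiv10_lt t h
      rw [cd_pos t d h, cd_pos t 0 h,
          ih _ (d + 1) (by omega), ih _ (0 + 1) (by omega)]
      ring
    · rw [cd_nonpos t d h, cd_nonpos t 0 h]; ring

theorem cd_acc (t d : Int) : pvB_count_digits t d = d + pvB_count_digits t 0 :=
  cd_acc_fuel t.toNat t d le_rfl

theorem cd_nonneg_fuel (k : Nat) : ∀ (t : Int), t.toNat ≤ k → 0 ≤ pvB_count_digits t 0 := by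
  induction k with
  | zero =>
    intro t hk
    have h : ¬ 0 < t := by omega
    rw [cd_nonpos t 0 h]
  | succ k ih =>
    intro t hk
    by_cases h : 0 < t
    · have hlt := pv_fdiv10_lt t h
      rw [cd_pos t 0 h, cd_acc _ (0 + 1)]
      have := ih (PySem.Int.floordiv t 10) (by omega)
      omega
    · rw [cd_nonpos t 0 h]

theorem cd_nonneg (t : Int) : 0 ≤ pvB_count_digits t 0 :=
  cd_nonneg_fuel t.toNat t le_rfl

theorem fdiv10_le_fdiv10 (m n : Int) (hmn : m ≤ n) :
    PySem.Int.floordiv m 10 ≤ PySem.Int.floordiv n 10 := by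
  rw [PySem.Int.floordiv_eq_ediv_of_pos (by omega : (0:Int) < 10),
      PySem.Int.floordiv_eq_ediv_of_pos (by omega : (0:Int) < 10)]
  exact Int.ediv_le_ediv (by omega) hmn

theorem cd_mono_fuel (k : Nat) : ∀ (m n : Int), 0 ≤ m → m ≤ n → n.toNat ≤ k →
    pvB_count_digits m 0 ≤ pvB_count_digits n 0 := by
  induction k with
  | zero =>
    intro m n hm hmn hk
    have h : ¬ 0 < m := by omega
    rw [cd_nonpos m 0 h]
    exact cd_nonneg n
  | succ k ih =>
    intro m n hm hmn hk
    by_cases h : 0 < m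
    · have hn : 0 < n := by omega
      have hlt := pv_fdiv10_lt n hn
      rw [cd_pos m 0 h, cd_pos n 0 hn, cd_acc _ (0 + 1), cd_acc (PySem.Int.floordiv n 10) (0 + 1)]
      have hdm : 0 ≤ PySem.Int.floordiv m 10 := by
        rw [PySem.Int.floordiv_eq_ediv_of_pos (by omega : (0:Int) < 10)]
        exact Int.ediv_nonneg (by omega) (by omega)
      have := ih (PySem.Int.floordiv m 10) (PySem.Int.floordiv n 10) hdm
        (fdiv10_le_fdiv10 m n hmn) (by omega)
      omega
    · rw [cd_nonpos m 0 h]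
      exact cd_nonneg n

theorem cd_mono (m n : Int) (hm : 0 ≤ m) (hmn : m ≤ n) :
    pvB_count_digits m 0 ≤ pvB_count_digits n 0 :=
  cd_mono_fuel n.toNat m n hm hmn le_rfl

theorem ds_le_fuel (k : Nat) : ∀ (n : Int), n.toNat ≤ k →
    pvB_digit_sum n 0 ≤ 9 * pvB_count_digits n 0 := by
  induction k with
  | zero =>
    intro n hk
    have h : ¬ 0 < n := by omega
    rw [dsB_nonpos n 0 h, cd_nonpos n 0 h]; omega
  | succ k ih =>
    intro n hk
    by_cases h : 0 < n
    · have hlt := pv_fdiv10_lt n h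
      rw [dsB_pos n 0 h, cd_pos n 0 h, ds_acc _ (0 + PySem.Int.mod n 10), cd_acc _ (0 + 1)]
      have hmod : PySem.Int.mod n 10 = n % 10 :=
        PySem.Int.mod_eq_emod_of_pos (by omega : (0:Int) < 10)
      have h1 : 0 ≤ n % 10 := Int.emod_nonneg n (by omega)
      have h2 : n % 10 < 10 := Int.emod_lt_of_pos n (by omega)
      have := ih (PySem.Int.floordiv n 10) (by omega)
      omega
    · rw [dsB_nonpos n 0 h, cd_nonpos n 0 h]; omega

theorem ds_le (n : Int) : pvB_digit_sum n 0 ≤ 9 * pvB_count_digits n 0 :=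
  ds_le_fuel n.toNat n le_rfl

-- ===== VERDICT (by name: the statement is the Claim_ definition above) =====
theorem find_sum_seeds_spec : Claim_equal_find_sum_seeds := by
  intro number _
  unfold Spec_find_sum_seeds find_sum_seeds find_sum_seeds_alt
  rw [PySem.List.foldl_append_ite_eq_filter]
  simp only [List.nil_append, ds_eq]
  by_cases hn : number ≤ 1
  · rw [PySem.List.pyRange_one_eq_nil hn,
        PySem.List.pyRange_one_eq_nil (le_trans hn (le_max_left _ _))]
  · have hd := cd_nonneg number
    have h1 : (1:Int) ≤ max 1 (number - 9 * pvB_count_digits number 0) := le_max_left _ _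
    have h2 : max 1 (number - 9 * pvB_count_digits number 0) ≤ number :=
      max_le (by omega) (by omega)
    rw [PySem.List.pyRange_one_append 1 _ number h1 h2, List.filter_append]
    have hzero : (PySem.List.pyRange 1 (max 1 (number - 9 * pvB_count_digits number 0)) 1).filter
        (fun i => decide (i + pvB_digit_sum i 0 = number)) = [] := by
      rw [List.filter_eq_nil_iff]
      intro i hi
      rw [PySem.List.mem_pyRange_one] at hi
      have hlt : i < number - 9 * pvB_count_digits number 0 := by
        by_cases hc : number - 9 * pvB_count_digits number 0 ≤ 1
        · rw [max_eq_left hc] at hi; omega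
        · rw [max_eq_right (by omega : (1:Int) ≤ number - 9 * pvB_count_digits number 0)] at hi
          exact hi.2
      have hds := ds_le i
      have hmono := cd_mono i number (by omega) (by omega)
      simp only [decide_eq_true_eq]
      omega
    rw [hzero, List.nil_append]
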